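-- pv_equiv track=rewrite | github.com/saltedfishxx/CS2040S | Other trivia materials/Computational thinking/Project - Copy/utility.py | get_rS_and_wS_q1
-- ===== SOURCE A (Python) =====
-- def get_syntax_error_msg_q1(your_packageSet):
--     if type(your_packageSet) != list:
--         return "Your answer is not a list. Your route must be a list of package IDs"
--
--     if not all(type(elem)==str for elem in your_packageSet):
--         return "Your answer must be a list of strings (packageIDs) only."
--
--     # check if there are duplicate flagIDs in your_route
--     if len(your_packageSet) != len(set(your_packageSet)):
--         return "There are duplicate package IDs in your package selection. packageIDs in your package selection must be unique."
--
--     return None # all ok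
--
-- def get_rS_and_wS_q1(your_packageSet, packages_dict, W):
--     # check for syntax error first
--     err_msg = get_syntax_error_msg_q1(your_packageSet)
--     if err_msg != None:
--         return err_msg, 0, 0
--     # calculate the sum of rewards and weights
--     rS, wS = 0, 0
--     for pid in your_packageSet:
--         if not pid in packages_dict:
--             return "Package ID in your package selection is not valid : " + pid, 0, 0 # error
--         rS += packages_dict[pid][1]
--         wS += packages_dict[pid][2]
--     return None, rS, wS # no error
-- ===== SOURCE B (Python) =====
-- def get_syntax_error_msg_q1(your_packageSet):
--     if type(your_packageSet) != list:
--         return "Your answer is not a list. Your route must be a list of package IDs"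
--     if not all(type(elem) == str for elem in your_packageSet):
--         return "Your answer must be a list of strings (packageIDs) only."
--     if len(your_packageSet) != len(set(your_packageSet)):
--         return "There are duplicate package IDs in your package selection. packageIDs in your package selection must be unique."
--     return None
--
--
-- def get_rS_and_wS_q1(your_packageSet, packages_dict, W):
--     err_msg = get_syntax_error_msg_q1(your_packageSet)
--     if err_msg is not None:
--         return err_msg, 0, 0
--     # validation: scan for the first pid that is not a key of the dict
--     valid = set(packages_dict)
--     for pid in your_packageSet:
--         if pid not in valid:
--             return "Package ID in your package selection is not valid : " + pid, 0, 0
--     # aggregation: one pass over the DICT, picking up the chosen packages;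
--     # correct because the chosen pids are unique, all present, and + is commutative
--     chosen = set(your_packageSet)
--     rS = wS = 0
--     for pid, v in packages_dict.items():
--         if pid in chosen:
--             rS += v[1]
--             wS += v[2]
--     return None, rS, wS
-- ===== Notes on version B (the rewrite author's own statement) =====
-- stated objective: alternative
-- what changed: A fuses validation and accumulation in one loop over the selection with a dict lookup per pid; B validates against a precomputed key set and then aggregates by a single pass over the dict's items filtered by the chosen-pid set, so no per-pid dict lookup happens at all (correct since pids are unique, all present, and addition commutes).
import Mathlib
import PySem

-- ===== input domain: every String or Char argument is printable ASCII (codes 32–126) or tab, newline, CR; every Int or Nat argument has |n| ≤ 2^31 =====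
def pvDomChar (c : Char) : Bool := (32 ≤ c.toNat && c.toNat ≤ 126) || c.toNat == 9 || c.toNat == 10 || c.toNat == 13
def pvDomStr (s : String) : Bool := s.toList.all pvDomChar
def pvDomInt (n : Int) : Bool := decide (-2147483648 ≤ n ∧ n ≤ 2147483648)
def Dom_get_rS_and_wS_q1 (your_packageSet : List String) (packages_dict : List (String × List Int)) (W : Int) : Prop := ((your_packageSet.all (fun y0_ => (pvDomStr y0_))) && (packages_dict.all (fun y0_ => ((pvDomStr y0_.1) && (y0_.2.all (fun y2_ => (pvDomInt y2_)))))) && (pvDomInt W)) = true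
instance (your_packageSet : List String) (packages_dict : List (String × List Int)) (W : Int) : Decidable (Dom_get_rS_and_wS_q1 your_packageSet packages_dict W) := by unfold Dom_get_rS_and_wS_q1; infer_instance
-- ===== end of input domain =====

-- B replaces A's fused per-pid validate-and-accumulate loop (a dict lookup per pid) with
-- a validation scan against the key set followed by ONE pass over the dict's items
-- filtered by the chosen-pid set (objective: alternative traversal of the same data).
-- The Lean-typed signature makes the helper's type/str checks vacuously true, so only
-- its duplicate check appears in the ports.

-- ===== PORT A =====
-- the fused loop of A: validate each pid and accumulate rS, wS as it goes
def pvLoopA (d : PySem.Dict String (List Int)) : List String → Int → Int → Option String × Int × Int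
  | [], rS, wS => (none, rS, wS)
  | pid :: rest, rS, wS =>
    match PySem.Dict.get? d pid with
    | none => (some ("Package ID in your package selection is not valid : " ++ pid), 0, 0)
    | some v =>
        -- v[1] / v[2]: Python raises IndexError when v is too short; Pre_ excludes that
        pvLoopA d rest (rS + (PySem.List.pyGet? v 1).getD 0) (wS + (PySem.List.pyGet? v 2).getD 0)

def get_rS_and_wS_q1 (your_packageSet : List String) (packages_dict : List (String × List Int)) (W : Int) : Option String × Int × Int :=
  if your_packageSet.length ≠ (PySem.Set.ofList your_packageSet).length then
    (some "There are duplicate package IDs in your package selection. packageIDs in your package selection must be unique.", 0, 0)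
  else pvLoopA (PySem.Dict.ofList packages_dict) your_packageSet 0 0

-- ===== PORT B =====
def get_rS_and_wS_q1_alt (your_packageSet : List String) (packages_dict : List (String × List Int)) (W : Int) : Option String × Int × Int :=
  if your_packageSet.length ≠ (PySem.Set.ofList your_packageSet).length then
    (some "There are duplicate package IDs in your package selection. packageIDs in your package selection must be unique.", 0, 0)
  else
    let d := PySem.Dict.ofList packages_dict
    -- valid = set(packages_dict); first pid not in valid
    let valid : PySem.Set String := PySem.Set.ofList (PySem.Dict.keys d)
    match your_packageSet.find? (fun p => !(PySem.Set.contains valid p)) with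
    | some bad => (some ("Package ID in your package selection is not valid : " ++ bad), 0, 0)
    | none =>
        -- one pass over the dict's items, picking up the chosen packages
        let chosen : PySem.Set String := PySem.Set.ofList your_packageSet
        let acc := (PySem.Dict.items d).foldl
          (fun (acc : Int × Int) kv =>
            if PySem.Set.contains chosen kv.1 then
              (acc.1 + (PySem.List.pyGet? kv.2 1).getD 0, acc.2 + (PySem.List.pyGet? kv.2 2).getD 0)
            else acc) (0, 0)
        (none, acc.1, acc.2)

-- ===== PRECONDITION & SPEC =====
-- Pre_ excludes exactly the inputs on which the Python A raises IndexError: a pid in the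
-- valid prefix (before the first invalid pid) whose package entry has fewer than 3 fields.
def Pre_get_rS_and_wS_q1 (your_packageSet : List String) (packages_dict : List (String × List Int)) (W : Int) : Prop :=
  your_packageSet.Nodup →
    ∀ p ∈ your_packageSet.takeWhile (fun q => (PySem.Dict.get? (PySem.Dict.ofList packages_dict) q).isSome),
      3 ≤ ((PySem.Dict.get? (PySem.Dict.ofList packages_dict) p).getD []).length
instance (your_packageSet : List String) (packages_dict : List (String × List Int)) (W : Int) : Decidable (Pre_get_rS_and_wS_q1 your_packageSet packages_dict W) := by unfold Pre_get_rS_and_wS_q1; infer_instance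

def pvWitness_get_rS_and_wS_q1 : List String × (List (String × List Int)) × Int :=
  (["a", "b"], [("a", [0, 1, 2]), ("b", [0, 5, 6])], 10)

def Spec_get_rS_and_wS_q1 (your_packageSet : List String) (packages_dict : List (String × List Int)) (W : Int) (out : Option String × Int × Int) : Prop := out = get_rS_and_wS_q1_alt your_packageSet packages_dict W
instance (your_packageSet : List String) (packages_dict : List (String × List Int)) (W : Int) (out : Option String × Int × Int) : Decidable (Spec_get_rS_and_wS_q1 your_packageSet packages_dict W out) := by unfold Spec_get_rS_and_wS_q1; infer_instance

-- ===== CLAIM (what is proved, stated in full; the proofs are below) =====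
def Claim_equal_get_rS_and_wS_q1 : Prop := ∀ (your_packageSet : List String) (packages_dict : List (String × List Int)) (W : Int), Dom_get_rS_and_wS_q1 your_packageSet packages_dict W → Pre_get_rS_and_wS_q1 your_packageSet packages_dict W → Spec_get_rS_and_wS_q1 your_packageSet packages_dict W (get_rS_and_wS_q1 your_packageSet packages_dict W)

-- ===== LEMMAS AND PROOFS =====

-- building a Set by folding add over xs keeps a subsequence of xs
theorem pv_foldl_add_sublist (xs : List String) :
    ∀ s : PySem.Set String, (xs.foldl PySem.Set.add s).Sublist (s ++ xs) := by
  induction xs with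
  | nil => intro s; simp
  | cons x xs ih =>
      intro s
      simp only [List.foldl_cons]
      refine (ih (PySem.Set.add s x)).trans ?_
      rw [PySem.Set.add_eq_ite]
      by_cases h : x ∈ s
      · simp [h]
      · simp [h]

-- folding add over fresh distinct elements just appends them
theorem pv_foldl_add_of_nodup (xs : List String) :
    ∀ s : PySem.Set String, xs.Nodup → (∀ x ∈ xs, x ∉ s) → xs.foldl PySem.Set.add s = s ++ xs := by
  induction xs with
  | nil => intro s _ _; simp
  | cons x xs ih =>
      intro s hnd hdis
      simp only [List.foldl_cons]
      rw [PySem.Set.add_of_not_mem (hdis x (List.mem_cons_self ..)),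
          ih (s ++ [x]) hnd.of_cons]
      · simp
      · intro y hy
        simp only [List.mem_append, List.mem_singleton]
        rintro (h | rfl)
        · exact hdis y (List.mem_cons_of_mem _ hy) h
        · exact (List.nodup_cons.mp hnd).1 hy

theorem pv_ofList_of_nodup (xs : List String) (h : xs.Nodup) : PySem.Set.ofList xs = xs := by
  rw [PySem.Set.ofList_eq_foldl, pv_foldl_add_of_nodup xs [] h (by simp)]
  simp

-- length of set(xs) equals len(xs) iff xs has no duplicates
theorem pv_len_ofList_eq_iff (xs : List String) :
    xs.length = (PySem.Set.ofList xs).length ↔ xs.Nodup := by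
  constructor
  · intro h
    have hsub : (PySem.Set.ofList xs).Sublist xs := by
      simpa using pv_foldl_add_sublist xs []
    have := hsub.eq_of_length h.symm
    rw [← this]
    exact PySem.Set.nodup_ofList xs
  · intro h
    rw [pv_ofList_of_nodup xs h]

-- A's fused loop, resolved: first invalid pid, else the two sums over the selection
theorem pvLoopA_eq (d : PySem.Dict String (List Int)) :
    ∀ (ps : List String) (rS wS : Int),
      pvLoopA d ps rS wS =
        match ps.find? (fun p => !(PySem.Dict.get? d p).isSome) with
        | some bad => (some ("Package ID in your package selection is not valid : " ++ bad), 0, 0)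
        | none => (none, rS + (ps.map (fun p => (PySem.List.pyGet? ((PySem.Dict.get? d p).getD []) 1).getD 0)).sum,
                         wS + (ps.map (fun p => (PySem.List.pyGet? ((PySem.Dict.get? d p).getD []) 2).getD 0)).sum) := by
  intro ps
  induction ps with
  | nil => intro rS wS; simp [pvLoopA]
  | cons p rest ih =>
      intro rS wS
      simp only [pvLoopA, List.find?_cons, List.map_cons, List.sum_cons]
      cases h : PySem.Dict.get? d p with
      | none => simp
      | some v =>
          simp only [Option.isSome_some, Bool.not_true]
          rw [ih]
          cases hf : rest.find? (fun q => !(PySem.Dict.get? d q).isSome) with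
          | none => simp; constructor <;> ring
          | some bad => simp

-- B's fold over the dict's items, resolved into the filtered sums
theorem pv_foldl_items (l : List (String × List Int)) (chosen : List String) :
    ∀ (r w : Int),
      l.foldl (fun (acc : Int × Int) kv =>
          if PySem.Set.contains chosen kv.1 then
            (acc.1 + (PySem.List.pyGet? kv.2 1).getD 0, acc.2 + (PySem.List.pyGet? kv.2 2).getD 0)
          else acc) (r, w) =
        (r + ((l.filter (fun kv => PySem.Set.contains chosen kv.1)).map (fun kv => (PySem.List.pyGet? kv.2 1).getD 0)).sum,
         w + ((l.filter (fun kv => PySem.Set.contains chosen kv.1)).map (fun kv => (PySem.List.pyGet? kv.2 2).getD 0)).sum) := by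
  induction l with
  | nil => intro r w; simp
  | cons kv rest ih =>
      intro r w
      by_cases h : PySem.Set.contains chosen kv.1 = true
      · simp only [List.foldl_cons, h, if_true, List.filter_cons_of_pos, List.map_cons, List.sum_cons]
        rw [ih]
        refine Prod.ext ?_ ?_ <;> simp <;> ring
      · rw [List.foldl_cons, if_neg (by simpa [PySem.Set.contains] using h),
             List.filter_cons_of_neg (by simpa [PySem.Set.contains] using h)]
        exact ih r w

-- the selection is a permutation of the dict keys filtered to the chosen set,
-- so the per-pid sums equal the filtered-items sums
theorem pv_sum_perm (d : PySem.Dict String (List Int)) (ps : List String)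
    (hkeys : (PySem.Dict.keys d).Nodup)
    (hnd : ps.Nodup)
    (hall : ∀ p ∈ ps, (PySem.Dict.get? d p).isSome)
    (i : Int) :
    (ps.map (fun p => (PySem.List.pyGet? ((PySem.Dict.get? d p).getD []) i).getD 0)).sum =
      (((PySem.Dict.items d).filter (fun kv => PySem.Set.contains (PySem.Set.ofList ps) kv.1)).map
        (fun kv => (PySem.List.pyGet? kv.2 i).getD 0)).sum := by
  rw [pv_ofList_of_nodup ps hnd]
  set filt := (PySem.Dict.items d).filter (fun kv => PySem.Set.contains ps kv.1) with hfilt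
  -- the filtered keys are a permutation of the selection
  have hsubfst : ((filt.map Prod.fst).Sublist (PySem.Dict.keys d)) := by
    rw [PySem.Dict.keys]
    exact (List.filter_sublist (l := PySem.Dict.items d)).map Prod.fst
  have hndf : (filt.map Prod.fst).Nodup := hkeys.sublist hsubfst
  have hmem : ∀ k, k ∈ filt.map Prod.fst ↔ k ∈ ps := by
    intro k
    simp only [List.mem_map, hfilt, List.mem_filter]
    constructor
    · rintro ⟨kv, ⟨_, hc⟩, rfl⟩
      simpa [PySem.Set.contains] using hc
    · intro hk
      have hs := hall k hk
      obtain ⟨v, hv⟩ := Option.isSome_iff_exists.mp hs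
      exact ⟨(k, v), ⟨PySem.Dict.mem_items_of_get?_eq_some d hv, by simpa [PySem.Set.contains] using hk⟩, rfl⟩
  have hperm : ps.Perm (filt.map Prod.fst) := by
    rw [List.perm_ext_iff_of_nodup hnd hndf]
    intro a; exact (hmem a).symm
  -- on the filtered items the lookup returns the stored value
  have hmapeq : filt.map (fun kv => (PySem.List.pyGet? kv.2 i).getD 0) =
      (filt.map Prod.fst).map (fun p => (PySem.List.pyGet? ((PySem.Dict.get? d p).getD []) i).getD 0) := by
    rw [List.map_map]
    refine List.map_congr_left ?_
    intro kv hkv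
    have hkv' : kv ∈ PySem.Dict.items d := List.mem_of_mem_filter hkv
    have : PySem.Dict.get? d kv.1 = some kv.2 := PySem.Dict.get?_of_mem_items d hkv' hkeys
    simp [Function.comp, this]
  rw [hmapeq]
  exact (hperm.map _).sum_eq

-- ===== VERDICT (by name: the statement is the Claim_ definition above) =====
theorem get_rS_and_wS_q1_spec : Claim_equal_get_rS_and_wS_q1 := by
  intro ps pd W _ hpre
  unfold Spec_get_rS_and_wS_q1 get_rS_and_wS_q1 get_rS_and_wS_q1_alt
  by_cases hdup : ps.length ≠ (PySem.Set.ofList ps).length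
  · simp [hdup]
  · replace hdup : ps.length = (PySem.Set.ofList ps).length := not_not.mp hdup
    have hnd : ps.Nodup := (pv_len_ofList_eq_iff ps).mp hdup
    simp only [hdup, ne_eq, not_true_eq_false, if_false]
    set d := PySem.Dict.ofList pd with hd
    have hkeys : (PySem.Dict.keys d).Nodup := PySem.Dict.nodup_keys_ofList pd
    have hpred : (fun p => !(PySem.Set.contains (PySem.Set.ofList (PySem.Dict.keys d)) p)) =
        (fun p => !(PySem.Dict.get? d p).isSome) := by
      funext p
      rw [pv_ofList_of_nodup _ hkeys]
      have : (PySem.Set.contains (PySem.Dict.keys d) p) = (PySem.Dict.get? d p).isSome := by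
        cases h : PySem.Dict.get? d p with
        | none =>
            have hm := (PySem.Dict.get?_eq_none_iff_not_mem_keys d p).mp h
            simp [PySem.Set.contains, hm]
        | some v =>
            have hm : p ∈ PySem.Dict.keys d := by
              by_contra hc
              rw [(PySem.Dict.get?_eq_none_iff_not_mem_keys d p).mpr hc] at h
              cases h
            simp [PySem.Set.contains, hm]
      rw [this]
    rw [pvLoopA_eq, hpred]
    cases hf : ps.find? (fun p => !(PySem.Dict.get? d p).isSome) with
    | some bad => simp
    | none =>
        have hall : ∀ p ∈ ps, (PySem.Dict.get? d p).isSome := by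
          intro p hp
          have h2 := List.find?_eq_none.mp hf p hp
          simp only [Bool.not_eq_true', Bool.not_eq_false] at h2
          exact h2
        rw [pv_foldl_items, pv_sum_perm d ps hkeys hnd hall 1, pv_sum_perm d ps hkeys hnd hall 2]
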